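-- pv_equiv track=rewrite | github.com/seba2390/Azurestuff | ___OLD___/src/TorchQcircuit.py | generate_string_representation
-- ===== SOURCE A (Python) =====
-- def generate_string_representation(gate_name: str,
--                                    qubit_i: int,
--                                    qubit_j: int,
--                                    N: int):
--     if not 0 <= qubit_i < N or not 0 <= qubit_j < N:
--         raise ValueError("Qubit indices are out of bounds..")
--     if gate_name not in ['X', 'Y', 'Z', 'I']:
--         raise ValueError("unknown gate name..")
--     gates = ['I' for qubit in range(N)]
--     gates[qubit_i] = gate_name
--     gates[qubit_j] = gate_name
--     return ''.join(gate for gate in gates)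
-- ===== SOURCE B (Python) =====
-- def generate_string_representation(gate_name: str,
--                                    qubit_i: int,
--                                    qubit_j: int,
--                                    N: int):
--     if not 0 <= qubit_i < N or not 0 <= qubit_j < N:
--         raise ValueError("Qubit indices are out of bounds..")
--     if gate_name not in ['X', 'Y', 'Z', 'I']:
--         raise ValueError("unknown gate name..")
--     lo, hi = (qubit_i, qubit_j) if qubit_i <= qubit_j else (qubit_j, qubit_i)
--     if lo == hi:
--         return 'I' * lo + gate_name + 'I' * (N - lo - 1)
--     return 'I' * lo + gate_name + 'I' * (hi - lo - 1) + gate_name + 'I' * (N - hi - 1)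
-- ===== Notes on version B (the rewrite author's own statement) =====
-- stated objective: simpler
-- what changed: Replaces the build-a-list-of-'I'-then-overwrite-two-slots-then-join construction with a closed-form concatenation of three (or two) 'I' runs around the sorted pair of indices.
import Mathlib
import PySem

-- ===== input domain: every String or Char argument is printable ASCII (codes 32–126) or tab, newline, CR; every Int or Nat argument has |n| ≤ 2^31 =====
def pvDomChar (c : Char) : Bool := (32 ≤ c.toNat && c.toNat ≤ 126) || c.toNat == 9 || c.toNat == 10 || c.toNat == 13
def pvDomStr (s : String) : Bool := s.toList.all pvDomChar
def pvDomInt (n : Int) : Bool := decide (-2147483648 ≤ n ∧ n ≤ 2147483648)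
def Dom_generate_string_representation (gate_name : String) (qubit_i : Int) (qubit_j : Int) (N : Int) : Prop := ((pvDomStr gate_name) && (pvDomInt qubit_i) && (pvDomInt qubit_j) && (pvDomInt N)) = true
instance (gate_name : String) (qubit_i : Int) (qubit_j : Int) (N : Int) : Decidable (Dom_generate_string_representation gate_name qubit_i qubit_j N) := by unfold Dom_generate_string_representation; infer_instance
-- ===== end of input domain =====

-- B replaces A's list-fill-and-overwrite-then-join by a closed-form concatenation of 'I' runs
-- around the two (sorted) gate positions; same cost, simpler shape. Raising inputs are outside Pre_.

-- ===== PORT A =====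
-- The two ValueError guards of A raise; those inputs are excluded by Pre_ below.
def generate_string_representation (gate_name : String) (qubit_i : Int) (qubit_j : Int) (N : Int) : String :=
  let gates : List String := (PySem.List.pyRange 0 N 1).map (fun _ => "I")
  let gates := PySem.List.pySetD gates qubit_i gate_name
  let gates := PySem.List.pySetD gates qubit_j gate_name
  PySem.Str.join "" gates

-- ===== PORT B =====
-- 'I' * n  (string repetition; n ≤ 0 gives "")
def pvStrMulI (n : Int) : String := String.ofList (PySem.List.pyRepeat ['I'] n)

-- The two ValueError guards of B raise; those inputs are excluded by Pre_ below.
def generate_string_representation_alt (gate_name : String) (qubit_i : Int) (qubit_j : Int) (N : Int) : String :=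
  let lo := if qubit_i ≤ qubit_j then qubit_i else qubit_j
  let hi := if qubit_i ≤ qubit_j then qubit_j else qubit_i
  if lo = hi then
    pvStrMulI lo ++ gate_name ++ pvStrMulI (N - lo - 1)
  else
    pvStrMulI lo ++ gate_name ++ pvStrMulI (hi - lo - 1) ++ gate_name ++ pvStrMulI (N - hi - 1)

-- ===== PRECONDITION & SPEC =====
-- Pre_ excludes exactly the inputs on which A raises ValueError: an index out of [0, N) or a
-- gate name outside {X, Y, Z, I}.
def Pre_generate_string_representation (gate_name : String) (qubit_i : Int) (qubit_j : Int) (N : Int) : Prop :=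
  (0 ≤ qubit_i ∧ qubit_i < N) ∧ (0 ≤ qubit_j ∧ qubit_j < N) ∧
  (gate_name = "X" ∨ gate_name = "Y" ∨ gate_name = "Z" ∨ gate_name = "I")
instance (gate_name : String) (qubit_i : Int) (qubit_j : Int) (N : Int) : Decidable (Pre_generate_string_representation gate_name qubit_i qubit_j N) := by unfold Pre_generate_string_representation; infer_instance

def pvWitness_generate_string_representation : String × Int × Int × Int := ("X", 1, 3, 5)

def Spec_generate_string_representation (gate_name : String) (qubit_i : Int) (qubit_j : Int) (N : Int) (out : String) : Prop := out = generate_string_representation_alt gate_name qubit_i qubit_j N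
instance (gate_name : String) (qubit_i : Int) (qubit_j : Int) (N : Int) (out : String) : Decidable (Spec_generate_string_representation gate_name qubit_i qubit_j N out) := by unfold Spec_generate_string_representation; infer_instance

-- ===== CLAIM (what is proved, stated in full; the proofs are below) =====
def Claim_equal_generate_string_representation : Prop := ∀ (gate_name : String) (qubit_i : Int) (qubit_j : Int) (N : Int), Dom_generate_string_representation gate_name qubit_i qubit_j N → Pre_generate_string_representation gate_name qubit_i qubit_j N → Spec_generate_string_representation gate_name qubit_i qubit_j N (generate_string_representation gate_name qubit_i qubit_j N)

-- ===== LEMMAS AND PROOFS =====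

lemma pv_join_nil_eq_flatten (l : List (List Char)) : PySem.Chars.join [] l = l.flatten := by
  induction l with
  | nil => rfl
  | cons x xs ih => cases xs <;> simp_all [PySem.Chars.join, List.intercalate]

lemma pv_set_replicate (x v : α) : ∀ (n a : Nat), a < n →
    (List.replicate n x).set a v
      = List.replicate a x ++ v :: List.replicate (n - a - 1) x := by
  intro n
  induction n with
  | zero => omega
  | succ m ih =>
    intro a ha
    cases a with
    | zero => simp [List.replicate_succ]
    | succ a' =>
      simp only [List.replicate_succ, List.set_cons_succ]
      rw [ih a' (by omega)]
      simp

-- main flatten characterisation for a ≤ b < n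
lemma pv_flatten_set_set (g : List Char) (a b n : Nat) (hab : a ≤ b) (hb : b < n) :
    (((List.replicate n (['I'] : List Char)).set a g).set b g).flatten =
      if a = b then
        List.replicate a 'I' ++ g ++ List.replicate (n - a - 1) 'I'
      else
        List.replicate a 'I' ++ g ++ List.replicate (b - a - 1) 'I'
          ++ g ++ List.replicate (n - b - 1) 'I' := by
  by_cases hEq : a = b
  · subst hEq
    rw [List.set_set, pv_set_replicate _ _ _ _ (by omega)]
    simp [List.flatten_append, List.flatten_replicate_singleton]
  · rw [pv_set_replicate _ _ _ _ (by omega)]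
    have hlen : (List.replicate a (['I'] : List Char)).length = a := by simp
    rw [List.set_append_right _ _ (by simp; omega)]
    simp only [hlen]
    have hb' : b - a = (b - a - 1) + 1 := by omega
    rw [show (g :: List.replicate (n - a - 1) (['I'] : List Char)).set (b - a) g
          = g :: (List.replicate (n - a - 1) (['I'] : List Char)).set (b - a - 1) g by
        rw [hb']; simp]
    rw [pv_set_replicate _ _ _ _ (by omega)]
    simp only [if_neg hEq]
    simp [List.flatten_append, List.flatten_replicate_singleton]
    omega

lemma pv_map_toList_const_I (N : Int) :
    ((PySem.List.pyRange 0 N 1).map (fun _ => "I")).map String.toList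
      = List.replicate N.toNat (['I'] : List Char) := by
  rw [List.map_map]
  have h1 : ∀ c ∈ (PySem.List.pyRange 0 N 1).map (String.toList ∘ fun _ => "I"),
      c = (['I'] : List Char) := by
    intro c hc
    rcases List.mem_map.mp hc with ⟨x, -, rfl⟩
    simp
  rw [List.eq_replicate_of_mem h1]
  simp [PySem.List.length_pyRange_one]

lemma pv_toList_strMulI (n : Int) : (pvStrMulI n).toList = List.replicate n.toNat 'I' := by
  simp [pvStrMulI, PySem.List.pyRepeat_singleton]

lemma pv_join_toList (gates : List String) :
    (PySem.Str.join "" gates).toList = (gates.map String.toList).flatten := by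
  rw [PySem.Str.toList_join, show "".toList = ([] : List Char) from rfl, pv_join_nil_eq_flatten]

-- the core equality, stated for nonneg in-range indices with a ≤ b
lemma pv_main (g : String) (a b n : Nat) (hab : a ≤ b) (hb : b < n) :
    PySem.Str.join "" ((((PySem.List.pyRange 0 (n : Int) 1).map (fun _ => "I")).set a g).set b g)
      = (if (a : Int) = b then
          pvStrMulI a ++ g ++ pvStrMulI ((n : Int) - a - 1)
        else
          pvStrMulI a ++ g ++ pvStrMulI ((b : Int) - a - 1) ++ g ++ pvStrMulI ((n : Int) - b - 1)) := by
  apply String.toList_injective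
  rw [pv_join_toList]
  rw [List.map_set, List.map_set, pv_map_toList_const_I]
  rw [Int.toNat_natCast] at *
  rw [pv_flatten_set_set g.toList a b n hab hb]
  by_cases hEq : a = b
  · subst hEq
    simp [String.toList_append, pv_toList_strMulI]
  · rw [if_neg hEq, if_neg (by exact_mod_cast hEq)]
    simp [String.toList_append, pv_toList_strMulI]

-- ===== VERDICT (by name: the statement is the Claim_ definition above) =====
theorem generate_string_representation_spec : Claim_equal_generate_string_representation := by
  intro g i j N _ hpre
  obtain ⟨⟨hi0, hiN⟩, ⟨hj0, hjN⟩, _⟩ := hpre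
  unfold Spec_generate_string_representation generate_string_representation generate_string_representation_alt
  simp only
  rw [PySem.List.pySetD_of_nonneg _ _ hi0, PySem.List.pySetD_of_nonneg _ _ hj0]
  have hN0 : (0 : Int) ≤ N := by omega
  by_cases hij : i ≤ j
  · simp only [if_pos hij]
    have H := pv_main g i.toNat j.toNat N.toNat (by omega) (by omega)
    rw [Int.toNat_of_nonneg hi0, Int.toNat_of_nonneg hj0, Int.toNat_of_nonneg hN0] at H
    exact H
  · simp only [if_neg hij]
    have H := pv_main g j.toNat i.toNat N.toNat (by omega) (by omega)
    rw [Int.toNat_of_nonneg hi0, Int.toNat_of_nonneg hj0, Int.toNat_of_nonneg hN0] at H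
    rw [List.set_comm _ _ (by omega)] at H
    exact H
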